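-- pv_equiv track=rewrite | github.com/siberian122/kyoupuro | PAST.py | f
-- ===== SOURCE A (Python) =====
-- def f(n):
--     num=n
--     n=n//3
--     cnt=0
--     for i in range(1,n):
--         for l in range(1,n):
--             for k in range(1,n):
--                 if i**2+l**2+k**2+i*l+l*k+k*i==num:
--                     cnt+=1
--                 elif i**2+l**2+k**2+i*l+l*k+k*i>num:
--                     break
--     return cnt
-- ===== SOURCE B (Python) =====
-- def f(n):
--     m = n // 3
--     cnt = 0
--     for i in range(1, m):
--         if i*i + 2 + i + 1 + i > n:      # g(i,1,1): minimal value for this i; larger i only grow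
--             break
--         for l in range(1, m):
--             if i*i + l*l + 1 + i*l + l + i > n:   # g(i,l,1): minimal value for this (i,l)
--                 break
--             lo, hi = 1, m - 1
--             hit = 0
--             while lo <= hi:
--                 k = (lo + hi) // 2
--                 v = i*i + l*l + k*k + i*l + l*k + k*i
--                 if v == n:
--                     hit = 1
--                     break
--                 elif v < n:
--                     lo = k + 1
--                 else:
--                     hi = k - 1
--             cnt += hit
--     return cnt
-- ===== Notes on version B (the rewrite author's own statement) =====
-- stated objective: faster
-- what changed: Replaces the inner linear scan over k by a binary search on the (monotone) quadratic form, and breaks out of the i and l loops as soon as their minimal attainable value already exceeds n, so only feasible (i,l) pairs are examined.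
import Mathlib
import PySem

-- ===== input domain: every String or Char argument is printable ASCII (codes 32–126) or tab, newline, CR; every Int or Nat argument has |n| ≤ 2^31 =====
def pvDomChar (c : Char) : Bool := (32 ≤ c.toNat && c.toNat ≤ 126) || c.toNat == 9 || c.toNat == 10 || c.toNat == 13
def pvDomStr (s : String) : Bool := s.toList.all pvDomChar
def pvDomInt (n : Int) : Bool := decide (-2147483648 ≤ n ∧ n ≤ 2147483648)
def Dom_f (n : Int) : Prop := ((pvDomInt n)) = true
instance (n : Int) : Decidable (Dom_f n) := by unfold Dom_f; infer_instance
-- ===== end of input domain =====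

-- B replaces the inner linear k-scan by a binary search and stops the i/l loops once their
-- minimal attainable value exceeds n (objective: faster, asymptotically).

-- ===== PORT A =====
-- inner 'for k in range(1,n)' with its break
def fInner (num i l : Int) : List Int → Int → Int
  | [], cnt => cnt
  | k :: ks, cnt =>
    if i ^ 2 + l ^ 2 + k ^ 2 + i * l + l * k + k * i = num then fInner num i l ks (cnt + 1)
    else if i ^ 2 + l ^ 2 + k ^ 2 + i * l + l * k + k * i > num then cnt
    else fInner num i l ks cnt

def f (n : Int) : Int :=
  let num := n
  let n := PySem.Int.floordiv n 3
  (PySem.List.pyRange 1 n 1).foldl (fun cnt i =>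
    (PySem.List.pyRange 1 n 1).foldl (fun cnt l =>
      fInner num i l (PySem.List.pyRange 1 n 1) cnt) cnt) 0

-- ===== PORT B =====
-- the 'while lo <= hi' binary search (returns hit)
def fSearch (n i l lo hi : Int) : Int :=
  if h : lo ≤ hi then
    let k := PySem.Int.floordiv (lo + hi) 2
    if i * i + l * l + k * k + i * l + l * k + k * i = n then 1
    else if i * i + l * l + k * k + i * l + l * k + k * i < n then fSearch n i l (k + 1) hi
    else fSearch n i l lo (k - 1)
  else 0
termination_by (hi + 1 - lo).toNat
decreasing_by
  · have hb := PySem.Int.floordiv_two_mid_bounds h; omega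
  · have hb := PySem.Int.floordiv_two_mid_bounds h; omega

-- the 'for l in range(1,m)' loop with its break
def fLoopL (n m i : Int) : List Int → Int → Int
  | [], cnt => cnt
  | l :: ls, cnt =>
    if i * i + l * l + 1 + i * l + l + i > n then cnt
    else fLoopL n m i ls (cnt + fSearch n i l 1 (m - 1))

-- the 'for i in range(1,m)' loop with its break
def fLoopI (n m : Int) : List Int → Int → Int
  | [], cnt => cnt
  | i :: is, cnt =>
    if i * i + 2 + i + 1 + i > n then cnt
    else fLoopI n m is (fLoopL n m i (PySem.List.pyRange 1 m 1) cnt)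

def f_alt (n : Int) : Int :=
  let m := PySem.Int.floordiv n 3
  fLoopI n m (PySem.List.pyRange 1 m 1) 0

-- ===== PRECONDITION & SPEC =====
def Spec_f (n : Int) (out : Int) : Prop := out = f_alt n
instance (n : Int) (out : Int) : Decidable (Spec_f n out) := by unfold Spec_f; infer_instance

-- ===== CLAIM (what is proved, stated in full; the proofs are below) =====
def Claim_equal_f : Prop := ∀ (n : Int), Dom_f n → Spec_f n (f n)

-- ===== LEMMAS AND PROOFS =====

-- the quadratic form
def gv (i l k : Int) : Int := i * i + l * l + k * k + i * l + l * k + k * i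

theorem gv_mono (i l a b : Int) (h1 : 1 ≤ i) (h2 : 1 ≤ l) (h3 : 1 ≤ a) (h4 : a < b) :
    gv i l a < gv i l b := by unfold gv; nlinarith

theorem gv_le (i l k i' l' k' : Int) (hi : 1 ≤ i) (hl : 1 ≤ l) (hk : 1 ≤ k)
    (hi' : i ≤ i') (hl' : l ≤ l') (hk' : k ≤ k') : gv i l k ≤ gv i' l' k' := by
  unfold gv; nlinarith

theorem fInner_eq (num i l : Int) (h1 : 1 ≤ i) (h2 : 1 ≤ l) :
    ∀ (ks : List Int) (cnt : Int), List.Pairwise (· < ·) ks → (∀ x ∈ ks, 1 ≤ x) →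
    fInner num i l ks cnt = cnt + (if ∃ k ∈ ks, gv i l k = num then 1 else 0) := by
  intro ks
  induction ks with
  | nil => intro cnt _ _; simp [fInner]
  | cons k ks ih =>
    intro cnt hp hpos
    have hlt : ∀ x ∈ ks, k < x := (List.pairwise_cons.mp hp).1
    have hp' : List.Pairwise (· < ·) ks := (List.pairwise_cons.mp hp).2
    have hk1 : 1 ≤ k := hpos k (List.mem_cons_self)
    have hpos' : ∀ x ∈ ks, 1 ≤ x := fun x hx => hpos x (List.mem_cons_of_mem _ hx)
    have hpow : i ^ 2 + l ^ 2 + k ^ 2 + i * l + l * k + k * i = gv i l k := by unfold gv; ring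
    simp only [fInner, hpow]
    by_cases hc : gv i l k = num
    · rw [if_pos hc, ih (cnt + 1) hp' hpos']
      have hno : ¬ ∃ x ∈ ks, gv i l x = num := by
        rintro ⟨x, hx, hxe⟩
        have := gv_mono i l k x h1 h2 hk1 (hlt x hx)
        omega
      have hyes : ∃ x ∈ k :: ks, gv i l x = num := ⟨k, List.mem_cons_self, hc⟩
      rw [if_neg hno, if_pos hyes]; ring
    · rw [if_neg hc]
      by_cases hgt : gv i l k > num
      · rw [if_pos hgt]
        have hno : ¬ ∃ x ∈ k :: ks, gv i l x = num := by
          rintro ⟨x, hx, hxe⟩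
          rcases List.mem_cons.mp hx with h | h
          · exact hc (h ▸ hxe)
          · have := gv_mono i l k x h1 h2 hk1 (hlt x h); omega
        rw [if_neg hno]; ring
      · rw [if_neg hgt, ih cnt hp' hpos']
        congr 1
        have : (∃ x ∈ k :: ks, gv i l x = num) ↔ (∃ x ∈ ks, gv i l x = num) := by
          constructor
          · rintro ⟨x, hx, hxe⟩
            rcases List.mem_cons.mp hx with h | h
            · exact absurd (h ▸ hxe) hc
            · exact ⟨x, h, hxe⟩
          · rintro ⟨x, hx, hxe⟩; exact ⟨x, List.mem_cons_of_mem _ hx, hxe⟩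
        rw [if_congr this rfl rfl]

theorem fSearch_eq (num i l m : Int) (h1 : 1 ≤ i) (h2 : 1 ≤ l) :
    ∀ (N : Nat) (lo hi : Int), (hi + 1 - lo).toNat ≤ N → 1 ≤ lo → hi ≤ m - 1 →
    (∀ x, 1 ≤ x → x < m → gv i l x = num → lo ≤ x ∧ x ≤ hi) →
    fSearch num i l lo hi =
      (if ∃ k ∈ PySem.List.pyRange 1 m 1, gv i l k = num then 1 else 0) := by
  intro N
  induction N with
  | zero =>
    intro lo hi hN hlo hhi hinv
    have hlt : hi < lo := by omega
    rw [fSearch, dif_neg (by omega)]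
    have hno : ¬ ∃ k ∈ PySem.List.pyRange 1 m 1, gv i l k = num := by
      rintro ⟨x, hx, hxe⟩
      rw [PySem.List.mem_pyRange_one] at hx
      have := hinv x hx.1 hx.2 hxe; omega
    rw [if_neg hno]
  | succ N ihN =>
    intro lo hi hN hlo hhi hinv
    by_cases h : lo ≤ hi
    · have hb := PySem.Int.floordiv_two_mid_bounds h
      rw [fSearch, dif_pos h]
      set k := PySem.Int.floordiv (lo + hi) 2 with hk
      have hgvk : i * i + l * l + k * k + i * l + l * k + k * i = gv i l k := by unfold gv; ring
      simp only [hgvk]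
      have hk1 : 1 ≤ k := by omega
      by_cases hc : gv i l k = num
      · rw [if_pos hc]
        have hyes : ∃ x ∈ PySem.List.pyRange 1 m 1, gv i l x = num :=
          ⟨k, PySem.List.mem_pyRange_one.mpr ⟨by omega, by omega⟩, hc⟩
        rw [if_pos hyes]
      · rw [if_neg hc]
        by_cases hltn : gv i l k < num
        · rw [if_pos hltn]
          apply ihN (k + 1) hi (by omega) (by omega) hhi
          intro x hx1 hxm hxe
          have hold := hinv x hx1 hxm hxe
          by_cases hxk : x < k
          · have := gv_mono i l x k h1 h2 hx1 hxk; omega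
          · constructor
            · rcases lt_or_ge k x with h' | h'
              · omega
              · have hxeq : x = k := by omega
                exact absurd (hxeq ▸ hxe) hc
            · exact hold.2
        · rw [if_neg hltn]
          apply ihN lo (k - 1) (by omega) hlo (by omega)
          intro x hx1 hxm hxe
          have hold := hinv x hx1 hxm hxe
          constructor
          · exact hold.1
          · rcases lt_or_ge k x with h' | h'
            · have := gv_mono i l k x h1 h2 hk1 h'; omega
            · rcases eq_or_lt_of_le h' with h'' | h''
              · exact absurd (h'' ▸ hxe) hc
              · omega
    · rw [fSearch, dif_neg h]
      have hno : ¬ ∃ x ∈ PySem.List.pyRange 1 m 1, gv i l x = num := by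
        rintro ⟨x, hx, hxe⟩
        rw [PySem.List.mem_pyRange_one] at hx
        have := hinv x hx.1 hx.2 hxe; omega
      rw [if_neg hno]

theorem foldl_fix {a b : Type} (f : b → a → b) :
    ∀ (xs : List a) (c : b), (∀ x ∈ xs, ∀ c', f c' x = c') →
    xs.foldl f c = c := by
  intro xs
  induction xs with
  | nil => intro c _; rfl
  | cons x xs ih =>
    intro c h
    simp only [List.foldl_cons]
    rw [h x List.mem_cons_self c, ih c (fun y hy => h y (List.mem_cons_of_mem _ hy))]

theorem foldl_add_zero (t : Int → Int) :
    ∀ (xs : List Int) (c : Int), (∀ x ∈ xs, t x = 0) →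
    xs.foldl (fun c x => c + t x) c = c := by
  intro xs
  induction xs with
  | nil => intro c _; rfl
  | cons x xs ih =>
    intro c h
    simp only [List.foldl_cons]
    rw [h x List.mem_cons_self, ih (c + 0) (fun y hy => h y (List.mem_cons_of_mem _ hy))]
    ring

theorem fLoopL_eq (num m i : Int) (h1 : 1 ≤ i) :
    ∀ (ls : List Int) (cnt : Int), List.Pairwise (· < ·) ls → (∀ x ∈ ls, 1 ≤ x ∧ x < m) →
    fLoopL num m i ls cnt =
      ls.foldl (fun cnt l =>
        cnt + (if ∃ k ∈ PySem.List.pyRange 1 m 1, gv i l k = num then 1 else 0)) cnt := by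
  intro ls
  induction ls with
  | nil => intro cnt _ _; rfl
  | cons l ls ih =>
    intro cnt hp hb
    have hlt : ∀ x ∈ ls, l < x := (List.pairwise_cons.mp hp).1
    have hp' : List.Pairwise (· < ·) ls := (List.pairwise_cons.mp hp).2
    have hl1 : 1 ≤ l := (hb l List.mem_cons_self).1
    have hb' : ∀ x ∈ ls, 1 ≤ x ∧ x < m := fun x hx => hb x (List.mem_cons_of_mem _ hx)
    have hgv1 : i * i + l * l + 1 + i * l + l + i = gv i l 1 := by unfold gv; ring
    simp only [fLoopL, hgv1]
    by_cases hbr : gv i l 1 > num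
    · rw [if_pos hbr]
      -- every remaining l' (including l) contributes 0
      have hz : ∀ l' ∈ l :: ls,
          (if ∃ k ∈ PySem.List.pyRange 1 m 1, gv i l' k = num then 1 else 0) = (0 : Int) := by
        intro l' hl'
        have hll' : l ≤ l' := by
          rcases List.mem_cons.mp hl' with h | h
          · omega
          · have := hlt l' h; omega
        have hno : ¬ ∃ k ∈ PySem.List.pyRange 1 m 1, gv i l' k = num := by
          rintro ⟨x, hx, hxe⟩
          rw [PySem.List.mem_pyRange_one] at hx
          have := gv_le i l 1 i l' x h1 hl1 le_rfl le_rfl hll' hx.1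
          omega
        rw [if_neg hno]
      exact (foldl_add_zero _ (l :: ls) cnt hz).symm
    · rw [if_neg hbr]
      have hsearch : fSearch num i l 1 (m - 1) =
          (if ∃ k ∈ PySem.List.pyRange 1 m 1, gv i l k = num then 1 else 0) := by
        apply fSearch_eq num i l m h1 hl1 (m - 1 + 1 - 1).toNat 1 (m - 1) le_rfl le_rfl le_rfl
        intro x hx1 hxm _; omega
      rw [ih (cnt + fSearch num i l 1 (m - 1)) hp' hb', hsearch]
      simp only [List.foldl_cons]

theorem fLoopI_eq (num m : Int) :
    ∀ (is : List Int) (cnt : Int), List.Pairwise (· < ·) is → (∀ x ∈ is, 1 ≤ x ∧ x < m) →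
    fLoopI num m is cnt =
      is.foldl (fun cnt i =>
        (PySem.List.pyRange 1 m 1).foldl (fun cnt l =>
          cnt + (if ∃ k ∈ PySem.List.pyRange 1 m 1, gv i l k = num then 1 else 0)) cnt) cnt := by
  intro is
  induction is with
  | nil => intro cnt _ _; rfl
  | cons i is ih =>
    intro cnt hp hb
    have hlt : ∀ x ∈ is, i < x := (List.pairwise_cons.mp hp).1
    have hp' : List.Pairwise (· < ·) is := (List.pairwise_cons.mp hp).2
    have hi1 : 1 ≤ i := (hb i List.mem_cons_self).1
    have hb' : ∀ x ∈ is, 1 ≤ x ∧ x < m := fun x hx => hb x (List.mem_cons_of_mem _ hx)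
    have hgv1 : i * i + 2 + i + 1 + i = gv i 1 1 := by unfold gv; ring
    simp only [fLoopI, hgv1]
    by_cases hbr : gv i 1 1 > num
    · rw [if_pos hbr]
      -- every remaining i' contributes nothing: each inner fold is the identity
      have hz : ∀ i' ∈ i :: is, ∀ c : Int,
          (PySem.List.pyRange 1 m 1).foldl (fun cnt l =>
            cnt + (if ∃ k ∈ PySem.List.pyRange 1 m 1, gv i' l k = num then 1 else 0)) c = c := by
        intro i' hi' c
        have hii' : i ≤ i' := by
          rcases List.mem_cons.mp hi' with h | h
          · omega
          · have := hlt i' h; omega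
        apply foldl_add_zero
        intro l' hl'
        rw [PySem.List.mem_pyRange_one] at hl'
        have hno : ¬ ∃ k ∈ PySem.List.pyRange 1 m 1, gv i' l' k = num := by
          rintro ⟨x, hx, hxe⟩
          rw [PySem.List.mem_pyRange_one] at hx
          have := gv_le i 1 1 i' l' x hi1 le_rfl le_rfl hii' hl'.1 hx.1
          omega
        rw [if_neg hno]
      exact (foldl_fix _ (i :: is) cnt (fun i' hi' c => hz i' hi' c)).symm
    · rw [if_neg hbr]
      rw [ih _ hp' hb']
      rw [fLoopL_eq num m i hi1 (PySem.List.pyRange 1 m 1) cnt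
        (PySem.List.pairwise_lt_pyRange_one _ _)
        (fun x hx => PySem.List.mem_pyRange_one.mp hx)]
      simp only [List.foldl_cons]

-- ===== VERDICT (by name: the statement is the Claim_ definition above) =====
theorem f_spec : Claim_equal_f := by
  intro n _
  unfold Spec_f f f_alt
  rw [fLoopI_eq n (PySem.Int.floordiv n 3) (PySem.List.pyRange 1 (PySem.Int.floordiv n 3) 1) 0
    (PySem.List.pairwise_lt_pyRange_one _ _)
    (fun x hx => PySem.List.mem_pyRange_one.mp hx)]
  apply PySem.List.foldl_congr_mem
  intro acc i hi
  apply PySem.List.foldl_congr_mem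
  intro acc' l hl
  rw [PySem.List.mem_pyRange_one] at hi hl
  rw [fInner_eq n i l hi.1 hl.1 (PySem.List.pyRange 1 (PySem.Int.floordiv n 3) 1) acc'
    (PySem.List.pairwise_lt_pyRange_one _ _)
    (fun x hx => (PySem.List.mem_pyRange_one.mp hx).1)]
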